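-- pv_equiv track=rewrite | github.com/gravikumargarg-create/TDR-mapping | lvt_tdr_core.py | _build_tdr_summary_rows_from_mapping
-- ===== SOURCE A (Python) =====
-- NO_TDR_LABEL = "No TDR"
--
-- NOT_MAPPING_LABEL = "Not mapping with any files"
--
-- def _build_tdr_summary_rows_from_mapping(merged, lvt_status):
--     """
--     Build TDR Summary from mapping (LVT customers only). One row per TDR / No TDR / Not mapping.
--     - TDR rows: customers with status Found and a TDR Number.
--     - No TDR: customers with status Found but no TDR.
--     - Not mapping with any files: customers with status Not found (not in any data file).
--     Returns list of (label, total, passed, failed, not_found, status).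
--     """
--     from collections import defaultdict
--     lvt_status = lvt_status or {}
--     # Group LVT customers (merged) by mapping bucket
--     bucket_to_cids = defaultdict(list)
--     for cid, info in merged.items():
--         status = (info.get("status") or "").strip()
--         tdr_id = info.get("tdr_id")
--         if status == "Found" and tdr_id:
--             bucket_to_cids[tdr_id].append(cid)
--         elif status == "Found but no TDR":
--             bucket_to_cids[NO_TDR_LABEL].append(cid)
--         else:
--             bucket_to_cids[NOT_MAPPING_LABEL].append(cid)
--
--     rows = []
--     # Sort: TDR numbers first, then "No TDR", then "Not mapping with any files"
--     def sort_key(item):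
--         label = item[0]
--         if label == NO_TDR_LABEL:
--             return (1, "")
--         if label == NOT_MAPPING_LABEL:
--             return (2, "")
--         return (0, str(label))
--
--     for bucket in sorted(bucket_to_cids.keys(), key=lambda b: sort_key((b,))):
--         cids = bucket_to_cids[bucket]
--         total = len(cids)
--         passed = failed = not_found = 0
--         for cid in cids:
--             st = (lvt_status.get(cid) or "").strip().lower()
--             if st == "passed":
--                 passed += 1
--             elif st == "failed":
--                 failed += 1
--             else:
--                 not_found += 1
--         if failed > 0:
--             status = "Failed"
--         elif not_found > 0:
--             status = "Partial"
--         else: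
--             status = "Passed"
--         rows.append((bucket, total, passed, failed, not_found, status))
--     return rows
-- ===== SOURCE B (Python) =====
-- NO_TDR_LABEL = "No TDR"
--
-- NOT_MAPPING_LABEL = "Not mapping with any files"
--
--
-- def _build_tdr_summary_rows_from_mapping(merged, lvt_status):
--     """Single pass: accumulate per-bucket counters [total, passed, failed, not_found]
--     directly while classifying each customer; no per-bucket cid lists, no second
--     counting loop."""
--     lvt_status = lvt_status or {}
--     counts = {}
--     for cid, info in merged.items():
--         status = (info.get("status") or "").strip()
--         tdr_id = info.get("tdr_id")
--         if status == "Found" and tdr_id: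
--             bucket = tdr_id
--         elif status == "Found but no TDR":
--             bucket = NO_TDR_LABEL
--         else:
--             bucket = NOT_MAPPING_LABEL
--         c = counts.setdefault(bucket, [0, 0, 0, 0])
--         c[0] += 1
--         st = (lvt_status.get(cid) or "").strip().lower()
--         if st == "passed":
--             c[1] += 1
--         elif st == "failed":
--             c[2] += 1
--         else:
--             c[3] += 1
--
--     def sort_key(label):
--         if label == NO_TDR_LABEL:
--             return (1, "")
--         if label == NOT_MAPPING_LABEL:
--             return (2, "")
--         return (0, label)
--
--     rows = []
--     for bucket in sorted(counts, key=sort_key):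
--         total, passed, failed, not_found = counts[bucket]
--         status = "Failed" if failed else ("Partial" if not_found else "Passed")
--         rows.append((bucket, total, passed, failed, not_found, status))
--     return rows
-- ===== Notes on version B (the rewrite author's own statement) =====
-- stated objective: simpler
-- what changed: Replaces the two-phase group-into-cid-lists-then-recount with a single pass that accumulates per-bucket counters (total/passed/failed/not_found) while classifying each customer, so no per-bucket lists are materialised and the inner counting loop disappears.
import Mathlib
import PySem

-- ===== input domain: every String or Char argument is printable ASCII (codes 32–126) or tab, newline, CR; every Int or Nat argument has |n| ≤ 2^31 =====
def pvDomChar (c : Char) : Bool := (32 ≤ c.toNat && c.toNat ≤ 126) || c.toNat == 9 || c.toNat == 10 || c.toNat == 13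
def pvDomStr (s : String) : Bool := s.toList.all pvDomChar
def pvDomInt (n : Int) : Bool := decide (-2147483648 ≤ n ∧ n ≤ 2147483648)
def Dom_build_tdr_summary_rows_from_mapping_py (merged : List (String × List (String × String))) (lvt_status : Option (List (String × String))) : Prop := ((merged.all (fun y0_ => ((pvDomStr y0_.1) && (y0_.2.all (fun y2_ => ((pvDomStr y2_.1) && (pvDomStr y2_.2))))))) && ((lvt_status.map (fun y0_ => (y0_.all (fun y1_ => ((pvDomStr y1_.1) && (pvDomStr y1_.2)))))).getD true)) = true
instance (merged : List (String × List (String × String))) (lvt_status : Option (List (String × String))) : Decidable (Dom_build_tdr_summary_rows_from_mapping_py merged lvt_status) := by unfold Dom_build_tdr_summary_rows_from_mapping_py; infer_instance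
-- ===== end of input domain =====

-- B replaces A's group-into-cid-lists-then-recount with a single pass accumulating
-- per-bucket counters; the proof shows the two produce identical rows (objective: simpler).

-- dict.get(k) on a String→String dict (first match; keys coming from a Python dict are unique)
def pyGetStr (info : List (String × String)) (k : String) : Option String :=
  (info.find? (fun p => p.1 == k)).map (·.2)

-- ===== PORT A =====
def build_tdr_summary_rows_from_mapping_py (merged : List (String × List (String × String))) (lvt_status : Option (List (String × String))) : List (String × Int × Int × Int × Int × String) :=
  let lvt := lvt_status.getD []
  -- group LVT customers by mapping bucket (defaultdict(list))
  let bucket_to_cids : PySem.Dict String (List String) :=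
    merged.foldl (fun d x =>
      let cid := x.1
      let info := x.2
      let status := PySem.Str.strip ((pyGetStr info "status").getD "")
      let tdr_id := (pyGetStr info "tdr_id").getD ""
      if status = "Found" ∧ tdr_id ≠ "" then d.modify tdr_id [] (· ++ [cid])
      else if status = "Found but no TDR" then d.modify "No TDR" [] (· ++ [cid])
      else d.modify "Not mapping with any files" [] (· ++ [cid])) PySem.Dict.empty
  let sortedBuckets := PySem.List.sorted2 bucket_to_cids.keys
      (fun b => (if b = "No TDR" then 1 else if b = "Not mapping with any files" then 2 else 0 : Int))
      (fun b => if b = "No TDR" then "" else if b = "Not mapping with any files" then "" else b)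
  sortedBuckets.foldl (fun rows bucket =>
    let cids := bucket_to_cids.getD bucket []
    let total : Int := cids.length
    let pfn : Int × Int × Int := cids.foldl (fun a cid =>
      let st := PySem.Str.lower (PySem.Str.strip ((pyGetStr lvt cid).getD ""))
      if st = "passed" then (a.1 + 1, a.2.1, a.2.2)
      else if st = "failed" then (a.1, a.2.1 + 1, a.2.2)
      else (a.1, a.2.1, a.2.2 + 1)) (0, 0, 0)
    let status := if pfn.2.1 > 0 then "Failed" else if pfn.2.2 > 0 then "Partial" else "Passed"
    rows ++ [(bucket, total, pfn.1, pfn.2.1, pfn.2.2, status)]) []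

-- ===== PORT B =====
def build_tdr_summary_rows_from_mapping_py_alt (merged : List (String × List (String × String))) (lvt_status : Option (List (String × String))) : List (String × Int × Int × Int × Int × String) :=
  let lvt := lvt_status.getD []
  -- single pass: per-bucket counters (total, passed, failed, not_found)
  let counts : PySem.Dict String (Int × Int × Int × Int) :=
    merged.foldl (fun d x =>
      let cid := x.1
      let info := x.2
      let status := PySem.Str.strip ((pyGetStr info "status").getD "")
      let tdr_id := (pyGetStr info "tdr_id").getD ""
      let bucket := if status = "Found" ∧ tdr_id ≠ "" then tdr_id
                    else if status = "Found but no TDR" then "No TDR"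
                    else "Not mapping with any files"
      let st := PySem.Str.lower (PySem.Str.strip ((pyGetStr lvt cid).getD ""))
      d.modify bucket (0, 0, 0, 0) (fun c =>
        (c.1 + 1,
         (if st = "passed" then c.2.1 + 1 else c.2.1),
         (if st = "failed" then c.2.2.1 + 1 else c.2.2.1),
         (if st ≠ "passed" ∧ st ≠ "failed" then c.2.2.2 + 1 else c.2.2.2)))) PySem.Dict.empty
  let sortedBuckets := PySem.List.sorted2 counts.keys
      (fun b => (if b = "No TDR" then 1 else if b = "Not mapping with any files" then 2 else 0 : Int))
      (fun b => if b = "No TDR" then "" else if b = "Not mapping with any files" then "" else b)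
  sortedBuckets.foldl (fun rows bucket =>
    let c := counts.getD bucket (0, 0, 0, 0)
    let status := if c.2.2.1 ≠ 0 then "Failed" else if c.2.2.2 ≠ 0 then "Partial" else "Passed"
    rows ++ [(bucket, c.1, c.2.1, c.2.2.1, c.2.2.2, status)]) []

-- ===== PRECONDITION & SPEC =====
def Spec_build_tdr_summary_rows_from_mapping_py (merged : List (String × List (String × String))) (lvt_status : Option (List (String × String))) (out : List (String × Int × Int × Int × Int × String)) : Prop := out = build_tdr_summary_rows_from_mapping_py_alt merged lvt_status
instance (merged : List (String × List (String × String))) (lvt_status : Option (List (String × String))) (out : List (String × Int × Int × Int × Int × String)) : Decidable (Spec_build_tdr_summary_rows_from_mapping_py merged lvt_status out) := by unfold Spec_build_tdr_summary_rows_from_mapping_py; infer_instance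

-- ===== CLAIM (what is proved, stated in full; the proofs are below) =====
def Claim_equal_build_tdr_summary_rows_from_mapping_py : Prop := ∀ (merged : List (String × List (String × String))) (lvt_status : Option (List (String × String))), Dom_build_tdr_summary_rows_from_mapping_py merged lvt_status → Spec_build_tdr_summary_rows_from_mapping_py merged lvt_status (build_tdr_summary_rows_from_mapping_py merged lvt_status)

-- ===== LEMMAS AND PROOFS =====
set_option maxHeartbeats 1000000

-- the bucket an entry of `merged` falls into
def bucketOf (x : String × List (String × String)) : String :=
  let status := PySem.Str.strip ((pyGetStr x.2 "status").getD "")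
  let tdr_id := (pyGetStr x.2 "tdr_id").getD ""
  if status = "Found" ∧ tdr_id ≠ "" then tdr_id
  else if status = "Found but no TDR" then "No TDR"
  else "Not mapping with any files"

-- normalized lvt status of a cid
def stOf (lvt : List (String × String)) (cid : String) : String :=
  PySem.Str.lower (PySem.Str.strip ((pyGetStr lvt cid).getD ""))

-- A's per-customer grouping step is a modify at the customer's bucket
theorem stepA_eq :
    (fun (d : PySem.Dict String (List String)) (x : String × List (String × String)) =>
      let cid := x.1
      let info := x.2
      let status := PySem.Str.strip ((pyGetStr info "status").getD "")
      let tdr_id := (pyGetStr info "tdr_id").getD ""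
      if status = "Found" ∧ tdr_id ≠ "" then d.modify tdr_id [] (· ++ [cid])
      else if status = "Found but no TDR" then d.modify "No TDR" [] (· ++ [cid])
      else d.modify "Not mapping with any files" [] (· ++ [cid]))
    = fun d x => d.modify (bucketOf x) [] (· ++ [x.1]) := by
  funext d x
  simp only [bucketOf]
  split_ifs <;> rfl

-- B's per-customer counting step, written through bucketOf/stOf
theorem stepB_eq (lvt : List (String × String)) :
    (fun (d : PySem.Dict String (Int × Int × Int × Int)) (x : String × List (String × String)) =>
      let cid := x.1
      let info := x.2
      let status := PySem.Str.strip ((pyGetStr info "status").getD "")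
      let tdr_id := (pyGetStr info "tdr_id").getD ""
      let bucket := if status = "Found" ∧ tdr_id ≠ "" then tdr_id
                    else if status = "Found but no TDR" then "No TDR"
                    else "Not mapping with any files"
      let st := PySem.Str.lower (PySem.Str.strip ((pyGetStr lvt cid).getD ""))
      d.modify bucket (0, 0, 0, 0) (fun c =>
        (c.1 + 1,
         (if st = "passed" then c.2.1 + 1 else c.2.1),
         (if st = "failed" then c.2.2.1 + 1 else c.2.2.1),
         (if st ≠ "passed" ∧ st ≠ "failed" then c.2.2.2 + 1 else c.2.2.2))))
    = fun d x => d.modify (bucketOf x) (0, 0, 0, 0) (fun c =>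
        (c.1 + 1,
         (if stOf lvt x.1 = "passed" then c.2.1 + 1 else c.2.1),
         (if stOf lvt x.1 = "failed" then c.2.2.1 + 1 else c.2.2.1),
         (if stOf lvt x.1 ≠ "passed" ∧ stOf lvt x.1 ≠ "failed" then c.2.2.2 + 1 else c.2.2.2))) := by
  funext d x
  simp only [bucketOf, stOf]
  rfl

-- getD of a modify-by-key fold = fold of the per-key step over the matching elements
theorem getD_foldl_modify_by_key {ν : Type} {β : Type} (key : β → String) (d0 : ν) (f : β → ν → ν) :
    ∀ (l : List β) (d : PySem.Dict String ν) (c : String),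
      (l.foldl (fun d x => d.modify (key x) d0 (f x)) d).getD c d0
        = (l.filter (fun x => key x == c)).foldl (fun v x => f x v) (d.getD c d0) := by
  intro l
  induction l with
  | nil => intro d c; rfl
  | cons a t ih =>
    intro d c
    simp only [List.foldl_cons, List.filter_cons]
    by_cases h : key a = c
    · subst h
      simp [ih]
    · have hb : (key a == c) = false := by simp [h]
      rw [hb]
      simp only [Bool.false_eq_true, if_neg (by exact fun hc => hc), ih,
        PySem.Dict.getD_modify]
      rw [if_neg (fun hc => h hc.symm)]

-- B's counter fold over the entries of one bucket = (length, A's (passed,failed,not_found) fold)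
theorem counter_fold_eq (lvt : List (String × String)) :
    ∀ (l : List (String × List (String × String))) (t p f n : Int),
      (l.foldl (fun c x =>
          ((c.1 + 1 : Int),
           (if stOf lvt x.1 = "passed" then c.2.1 + 1 else c.2.1),
           (if stOf lvt x.1 = "failed" then c.2.2.1 + 1 else c.2.2.1),
           (if stOf lvt x.1 ≠ "passed" ∧ stOf lvt x.1 ≠ "failed" then c.2.2.2 + 1 else c.2.2.2)))
        (t, p, f, n))
      = (t + l.length,
         ((l.map (·.1)).foldl (fun a cid =>
            if stOf lvt cid = "passed" then (a.1 + 1, a.2.1, a.2.2)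
            else if stOf lvt cid = "failed" then (a.1, a.2.1 + 1, a.2.2)
            else (a.1, a.2.1, a.2.2 + 1)) (p, f, n))) := by
  intro l
  induction l with
  | nil => intro t p f n; simp
  | cons a l ih =>
    intro t p f n
    simp only [List.foldl_cons, List.map_cons, List.length_cons]
    have hq : (if stOf lvt a.1 = "passed" then ((p + 1 : Int), f, n)
        else if stOf lvt a.1 = "failed" then (p, f + 1, n) else (p, f, n + 1))
      = ((if stOf lvt a.1 = "passed" then p + 1 else p),
         (if stOf lvt a.1 = "failed" then f + 1 else f),
         (if stOf lvt a.1 ≠ "passed" ∧ stOf lvt a.1 ≠ "failed" then n + 1 else n)) := by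
      by_cases h1 : stOf lvt a.1 = "passed"
      · simp [h1]
      · by_cases h2 : stOf lvt a.1 = "failed" <;> simp [h1, h2]
    rw [ih (t + 1)
        (if stOf lvt a.1 = "passed" then p + 1 else p)
        (if stOf lvt a.1 = "failed" then f + 1 else f)
        (if stOf lvt a.1 ≠ "passed" ∧ stOf lvt a.1 ≠ "failed" then n + 1 else n),
      ← hq]
    rw [Prod.mk.injEq]
    refine ⟨by push_cast; ring, rfl⟩

-- Python truthiness vs the '> 0' test: equal on nonnegative counters
theorem status_eq (r : Int × Int × Int) (h2 : (0:Int) ≤ r.2.1) (h3 : (0:Int) ≤ r.2.2) :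
    (if r.2.1 > 0 then "Failed" else if r.2.2 > 0 then "Partial" else "Passed")
      = (if r.2.1 ≠ 0 then "Failed" else if r.2.2 ≠ 0 then "Partial" else "Passed") := by
  by_cases hf : r.2.1 = 0
  · by_cases hn : r.2.2 = 0
    · simp [hf, hn]
    · have : (0:Int) < r.2.2 := lt_of_le_of_ne h3 (Ne.symm hn)
      simp [hf, hn, this]
  · have : (0:Int) < r.2.1 := lt_of_le_of_ne h2 (Ne.symm hf)
    simp [hf, this]

-- A's inner fold never decreases any counter (so failed/not_found are ≥ 0 from start 0)
theorem pfn_fold_ge (lvt : List (String × String)) :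
    ∀ (l : List String) (p f n : Int),
      p ≤ (l.foldl (fun a cid =>
            if stOf lvt cid = "passed" then ((a.1 + 1 : Int), a.2.1, a.2.2)
            else if stOf lvt cid = "failed" then (a.1, a.2.1 + 1, a.2.2)
            else (a.1, a.2.1, a.2.2 + 1)) (p, f, n)).1
      ∧ f ≤ (l.foldl (fun a cid =>
            if stOf lvt cid = "passed" then ((a.1 + 1 : Int), a.2.1, a.2.2)
            else if stOf lvt cid = "failed" then (a.1, a.2.1 + 1, a.2.2)
            else (a.1, a.2.1, a.2.2 + 1)) (p, f, n)).2.1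
      ∧ n ≤ (l.foldl (fun a cid =>
            if stOf lvt cid = "passed" then ((a.1 + 1 : Int), a.2.1, a.2.2)
            else if stOf lvt cid = "failed" then (a.1, a.2.1 + 1, a.2.2)
            else (a.1, a.2.1, a.2.2 + 1)) (p, f, n)).2.2 := by
  intro l
  induction l with
  | nil => intro p f n; exact ⟨le_refl _, le_refl _, le_refl _⟩
  | cons a t ih =>
    intro p f n
    simp only [List.foldl_cons]
    by_cases h1 : stOf lvt a = "passed"
    · simp only [h1, if_pos]
      have := ih (p + 1) f n
      exact ⟨le_trans (by omega) this.1, this.2.1, this.2.2⟩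
    · by_cases h2 : stOf lvt a = "failed"
      · simp only [h2, if_pos]
        have := ih p (f + 1) n
        exact ⟨this.1, le_trans (by omega) this.2.1, this.2.2⟩
      · simp only [if_neg h1, if_neg h2]
        have := ih p f (n + 1)
        exact ⟨this.1, this.2.1, le_trans (by omega) this.2.2⟩

-- ===== VERDICT (by name: the statement is the Claim_ definition above) =====
theorem build_tdr_summary_rows_from_mapping_py_spec : Claim_equal_build_tdr_summary_rows_from_mapping_py := by
  intro merged lvt_status _
  show _ = _
  unfold build_tdr_summary_rows_from_mapping_py build_tdr_summary_rows_from_mapping_py_alt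
  set lvt := lvt_status.getD [] with hlvt
  simp only [stepA_eq, stepB_eq lvt]
  -- both dicts have the same key list
  have hkeys :
      (merged.foldl (fun d x => d.modify (bucketOf x) [] (· ++ [x.1]))
        (PySem.Dict.empty : PySem.Dict String (List String))).keys
      = (merged.foldl (fun d x => d.modify (bucketOf x) (0,0,0,0) (fun c =>
          (c.1 + 1,
           (if stOf lvt x.1 = "passed" then c.2.1 + 1 else c.2.1),
           (if stOf lvt x.1 = "failed" then c.2.2.1 + 1 else c.2.2.1),
           (if stOf lvt x.1 ≠ "passed" ∧ stOf lvt x.1 ≠ "failed" then c.2.2.2 + 1 else c.2.2.2))))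
          (PySem.Dict.empty : PySem.Dict String (Int × Int × Int × Int))).keys := by
    rw [PySem.Dict.keys_foldl_modify_key merged bucketOf [] (fun _ x v => v ++ [x.1]),
        PySem.Dict.keys_foldl_modify_key merged bucketOf (0,0,0,0) (fun _ x c =>
          (c.1 + 1,
           (if stOf lvt x.1 = "passed" then c.2.1 + 1 else c.2.1),
           (if stOf lvt x.1 = "failed" then c.2.2.1 + 1 else c.2.2.1),
           (if stOf lvt x.1 ≠ "passed" ∧ stOf lvt x.1 ≠ "failed" then c.2.2.2 + 1 else c.2.2.2)))]
    rfl
  rw [hkeys]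
  -- the per-bucket row builders agree, so the output folds agree
  have hrow : (fun (rows : List (String × Int × Int × Int × Int × String)) bucket =>
      let cids := (merged.foldl (fun d x => d.modify (bucketOf x) [] (· ++ [x.1]))
          (PySem.Dict.empty : PySem.Dict String (List String))).getD bucket []
      let total : Int := cids.length
      let pfn : Int × Int × Int := cids.foldl (fun a cid =>
        if stOf lvt cid = "passed" then (a.1 + 1, a.2.1, a.2.2)
        else if stOf lvt cid = "failed" then (a.1, a.2.1 + 1, a.2.2)
        else (a.1, a.2.1, a.2.2 + 1)) (0, 0, 0)
      let status := if pfn.2.1 > 0 then "Failed" else if pfn.2.2 > 0 then "Partial" else "Passed"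
      rows ++ [(bucket, total, pfn.1, pfn.2.1, pfn.2.2, status)])
    = (fun rows bucket =>
      let c := (merged.foldl (fun d x => d.modify (bucketOf x) (0,0,0,0) (fun c =>
          (c.1 + 1,
           (if stOf lvt x.1 = "passed" then c.2.1 + 1 else c.2.1),
           (if stOf lvt x.1 = "failed" then c.2.2.1 + 1 else c.2.2.1),
           (if stOf lvt x.1 ≠ "passed" ∧ stOf lvt x.1 ≠ "failed" then c.2.2.2 + 1 else c.2.2.2))))
          (PySem.Dict.empty : PySem.Dict String (Int × Int × Int × Int))).getD bucket (0,0,0,0)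
      let status := if c.2.2.1 ≠ 0 then "Failed" else if c.2.2.2 ≠ 0 then "Partial" else "Passed"
      rows ++ [(bucket, c.1, c.2.1, c.2.2.1, c.2.2.2, status)]) := by
    funext rows bucket
    have hA := getD_foldl_modify_by_key bucketOf [] (fun x (v : List String) => v ++ [x.1]) merged PySem.Dict.empty bucket
    have hB := getD_foldl_modify_by_key bucketOf ((0,0,0,0) : Int × Int × Int × Int)
        (fun x c =>
          ((c.1 + 1 : Int),
           (if stOf lvt x.1 = "passed" then c.2.1 + 1 else c.2.1),
           (if stOf lvt x.1 = "failed" then c.2.2.1 + 1 else c.2.2.1),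
           (if stOf lvt x.1 ≠ "passed" ∧ stOf lvt x.1 ≠ "failed" then c.2.2.2 + 1 else c.2.2.2)))
        merged PySem.Dict.empty bucket
    show (rows ++ _ : List _) = rows ++ _
    rw [hA, hB, PySem.Dict.getD_empty, PySem.Dict.getD_empty,
      counter_fold_eq lvt (merged.filter (fun x => bucketOf x == bucket)) 0 0 0 0,
      PySem.List.foldl_append_singleton_eq_map (fun x => x.1)
        (merged.filter (fun x => bucketOf x == bucket)) []]
    simp only [List.nil_append, List.length_map, zero_add]
    have hge := pfn_fold_ge lvt ((merged.filter (fun x => bucketOf x == bucket)).map (fun x => x.1)) 0 0 0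
    refine congrArg (fun z => rows ++ [z]) ?_
    rw [Prod.mk.injEq]; refine ⟨rfl, ?_⟩
    rw [Prod.mk.injEq]; refine ⟨rfl, ?_⟩
    rw [Prod.mk.injEq]; refine ⟨rfl, ?_⟩
    rw [Prod.mk.injEq]; refine ⟨rfl, ?_⟩
    rw [Prod.mk.injEq]; refine ⟨rfl, ?_⟩
    exact status_eq _ hge.2.1 hge.2.2
  exact congrArg (fun f => List.foldl f [] _) hrow
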